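-- pv_equiv track=rewrite | github.com/MartinKlapacz/multifidelity-datafusion-GPs | dataAugmentationGP.py | augmentIter
-- ===== SOURCE A (Python) =====
-- def augmentIter(n):
--     i = 0
--     sign = -1
--     while i < n or sign == 1:
--         if i == 0: yield 0
--         if sign == 1:
--             sign = -1
--         else:
--             sign = 1
--             i += 1
--         yield sign * i
-- ===== SOURCE B (Python) =====
-- def augmentIter(n):
--     # Simpler: emit 0 once, then both signs of each magnitude per loop iteration.
--     if n > 0:
--         yield 0
--         k = 1
--         while k - 1 < n:
--             yield k
--             yield -k
--             k += 1
-- ===== Notes on version B (the rewrite author's own statement) =====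
-- stated objective: simpler
-- what changed: Replaces A's sign-toggling one-yield-per-iteration state machine with a plain loop over positive magnitudes that yields k and -k together each iteration after an initial 0.
import Mathlib
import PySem

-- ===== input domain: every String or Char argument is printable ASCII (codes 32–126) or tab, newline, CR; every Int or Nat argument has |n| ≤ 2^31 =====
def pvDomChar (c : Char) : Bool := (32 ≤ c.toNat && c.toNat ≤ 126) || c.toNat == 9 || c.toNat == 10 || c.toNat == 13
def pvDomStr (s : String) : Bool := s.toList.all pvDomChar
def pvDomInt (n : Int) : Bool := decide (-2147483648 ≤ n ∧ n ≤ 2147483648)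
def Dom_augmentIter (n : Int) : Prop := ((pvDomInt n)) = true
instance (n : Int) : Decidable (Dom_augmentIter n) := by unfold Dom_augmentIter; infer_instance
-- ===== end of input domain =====

-- B replaces A's sign-toggling one-yield-per-step state machine with a loop over positive
-- magnitudes emitting 0 then k, -k per iteration (objective: simpler); same return value.

-- ===== PORT A =====
-- A's while loop as recursion on state (i, sign); yields in the same order.
def pvLoopA (n i sign : Int) : List Int :=
  if h : i < n ∨ sign = 1 then
    (if i = 0 then [(0 : Int)] else []) ++
      (if hs : sign = 1 then (-1 * i) :: pvLoopA n i (-1)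
       else (1 * (i + 1)) :: pvLoopA n (i + 1) 1)
  else []
termination_by (2 * (n - i)).toNat + (if sign = 1 then 1 else 0)
decreasing_by
  · simp [hs]
  · simp [hs] at h ⊢; omega

def augmentIter (n : Int) : List Int := pvLoopA n 0 (-1)

-- ===== PORT B =====
-- B's while loop: both signs of magnitude k per iteration.
def pvLoopB (n k : Int) : List Int :=
  if k - 1 < n then k :: (-k) :: pvLoopB n (k + 1) else []
termination_by (n - k + 1).toNat
decreasing_by omega

def augmentIter_alt (n : Int) : List Int :=
  if n > 0 then 0 :: pvLoopB n 1 else []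

-- ===== PRECONDITION & SPEC =====
def Spec_augmentIter (n : Int) (out : List Int) : Prop := out = augmentIter_alt n
instance (n : Int) (out : List Int) : Decidable (Spec_augmentIter n out) := by unfold Spec_augmentIter; infer_instance

-- ===== CLAIM (what is proved, stated in full; the proofs are below) =====
def Claim_equal_augmentIter : Prop := ∀ (n : Int), Dom_augmentIter n → Spec_augmentIter n (augmentIter n)

-- ===== LEMMAS AND PROOFS =====

-- one A-iteration with sign = 1 yields -i and flips the sign back
lemma pvLoopA_pos (n i : Int) (hi : 1 ≤ i) :
    pvLoopA n i 1 = (-1 * i) :: pvLoopA n i (-1) := by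
  rw [pvLoopA]
  simp [show ¬ (i = 0) by omega]

-- after the initial 0, A's state machine from (i, -1) matches B's loop at k = i + 1
lemma pvLoop_eq (n : Int) : ∀ i : Int, 1 ≤ i → pvLoopA n i (-1) = pvLoopB n (i + 1) := by
  intro i hi
  rw [pvLoopA, pvLoopB]
  by_cases hc : i < n
  · have ih := pvLoop_eq n (i + 1) (by omega)
    simp [hc, show ¬ (i = 0) by omega,
      pvLoopA_pos n (i + 1) (by omega), ih]
  · simp [hc]
termination_by i => (n - i).toNat

-- ===== VERDICT (by name: the statement is the Claim_ definition above) =====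
theorem augmentIter_spec : Claim_equal_augmentIter := by
  intro n _
  unfold Spec_augmentIter augmentIter augmentIter_alt
  rw [pvLoopA]
  by_cases hn : n > 0
  · have hB : pvLoopB n 1 = 1 :: -1 :: pvLoopB n 2 := by
      rw [pvLoopB, if_pos (show (1 : Int) - 1 < n by omega)]; norm_num
    have := pvLoop_eq n 1 (by norm_num)
    simp [hn, hB, pvLoopA_pos n 1 (by norm_num), this]
  · simp [hn]
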